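-- pv_equiv track=rewrite | github.com/xchatzil/NOVA | notebooks/src/mst_prim.py | create_routes_dict
-- ===== SOURCE A (Python) =====
-- def create_routes_dict(mst_dict, root=0):
--     routes = {}
--     routes[root] = []
--     for node in mst_dict.keys():
--         route = []
--         current = node
--         while current != root:
--             current = mst_dict[current]
--             route.append(current)
--         routes[node] = route
--     return routes
-- ===== SOURCE B (Python) =====
-- def create_routes_dict(mst_dict, root=0):
--     # Memoized: resolve each node's route once, reusing the parent's route.
--     memo = {root: []}
--     for node in mst_dict.keys():
--         stack = []
--         cur = node
--         while cur not in memo: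
--             stack.append(cur)
--             cur = mst_dict[cur]
--         while stack:
--             x = stack.pop()
--             p = mst_dict[x]
--             memo[x] = [p] + memo[p]
--     routes = {root: []}
--     for node in mst_dict.keys():
--         routes[node] = memo[node]
--     return routes
-- ===== Notes on version B (the rewrite author's own statement) =====
-- stated objective: alternative
-- what changed: Instead of re-walking the full parent chain to the root for every node, B memoizes routes in a dict: it climbs only until it hits an already-resolved node, then unwinds an explicit stack building each route as parent-edge plus the parent's already-computed route, and finally emits the routes in A's key order.
import Mathlib
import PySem

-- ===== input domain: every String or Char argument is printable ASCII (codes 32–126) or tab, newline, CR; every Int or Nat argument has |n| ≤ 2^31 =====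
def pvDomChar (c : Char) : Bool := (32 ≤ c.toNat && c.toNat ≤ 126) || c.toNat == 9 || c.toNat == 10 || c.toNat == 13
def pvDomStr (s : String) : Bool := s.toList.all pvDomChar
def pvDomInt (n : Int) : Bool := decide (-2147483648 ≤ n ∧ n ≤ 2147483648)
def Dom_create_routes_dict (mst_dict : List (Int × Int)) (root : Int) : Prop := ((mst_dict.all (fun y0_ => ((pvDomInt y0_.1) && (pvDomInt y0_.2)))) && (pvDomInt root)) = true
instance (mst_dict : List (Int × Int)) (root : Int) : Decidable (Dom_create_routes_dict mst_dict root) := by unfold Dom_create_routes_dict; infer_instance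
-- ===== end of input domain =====

-- B memoizes path-to-root routes (climb to the first resolved node, unwind a stack reusing the
-- parent's route) instead of re-walking the whole chain for every node; same return value on Pre_.


-- ===== PORT A =====
-- the 'while current != root' loop of A; fuel mst_dict.length + 1 never runs out under Pre_
def pvWalkA (d : PySem.Dict Int Int) (root : Int) : Nat → Int → List Int → List Int
  | 0, _, route => route                      -- fuel exhausted (unreachable under Pre_)
  | fuel + 1, current, route =>
    if current == root then route
    else
      match d.get? current with
      | none => route                         -- KeyError (excluded by Pre_)
      | some p => pvWalkA d root fuel p (route ++ [p])

def create_routes_dict (mst_dict : List (Int × Int)) (root : Int) : List (Int × List Int) :=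
  let d := PySem.Dict.ofList mst_dict
  let routes : PySem.Dict Int (List Int) := PySem.Dict.empty.insert root []
  let routes := d.keys.foldl (fun routes node =>
    routes.insert node (pvWalkA d root (mst_dict.length + 1) node [])) routes
  routes.items

-- ===== PORT B =====
-- 'while cur not in memo: stack.append(cur); cur = mst_dict[cur]' — stack built front-first (pop order)
def pvClimb (d : PySem.Dict Int Int) (memo : PySem.Dict Int (List Int)) :
    Nat → Int → List Int → List Int
  | 0, _, stack => stack                      -- fuel exhausted (unreachable under Pre_)
  | fuel + 1, cur, stack =>
    if memo.contains cur then stack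
    else
      match d.get? cur with
      | none => cur :: stack                  -- KeyError (excluded by Pre_)
      | some p => pvClimb d memo fuel p (cur :: stack)

-- 'x = stack.pop(); p = mst_dict[x]; memo[x] = [p] + memo[p]'
def pvResolve (d : PySem.Dict Int Int) (memo : PySem.Dict Int (List Int)) (x : Int) :
    PySem.Dict Int (List Int) :=
  match d.get? x with
  | none => memo                              -- KeyError (excluded by Pre_)
  | some p => memo.insert x (p :: memo.getD p [])

def create_routes_dict_alt (mst_dict : List (Int × Int)) (root : Int) : List (Int × List Int) :=
  let d := PySem.Dict.ofList mst_dict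
  let memo : PySem.Dict Int (List Int) := PySem.Dict.empty.insert root []
  let memo := d.keys.foldl (fun memo node =>
    (pvClimb d memo (mst_dict.length + 1) node []).foldl (pvResolve d) memo) memo
  let routes : PySem.Dict Int (List Int) := PySem.Dict.empty.insert root []
  let routes := d.keys.foldl (fun routes node => routes.insert node (memo.getD node [])) routes
  routes.items

-- ===== PRECONDITION & SPEC =====
-- pvReaches d root f x: following parent pointers from x hits root within f steps (all lookups present)
def pvReaches (d : PySem.Dict Int Int) (root : Int) : Nat → Int → Bool
  | 0, x => x == root
  | f + 1, x =>
    x == root ||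
      (match d.get? x with
       | none => false
       | some p => pvReaches d root f p)

-- Pre_: every key's parent chain reaches the root (within ≤ #entries steps, which is no restriction:
-- a chain that reaches the root at all does so without repeating a key). Exactly where A returns:
-- otherwise A raises KeyError on a missing parent or loops forever on a cycle.
def Pre_create_routes_dict (mst_dict : List (Int × Int)) (root : Int) : Prop :=
  (mst_dict.all (fun kv =>
    pvReaches (PySem.Dict.ofList mst_dict) root mst_dict.length kv.1)) = true
instance (mst_dict : List (Int × Int)) (root : Int) : Decidable (Pre_create_routes_dict mst_dict root) := by unfold Pre_create_routes_dict; infer_instance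

def pvWitness_create_routes_dict : (List (Int × Int)) × Int := ([(1, 0), (2, 1), (3, 1)], 0)

def Spec_create_routes_dict (mst_dict : List (Int × Int)) (root : Int) (out : List (Int × List Int)) : Prop := out = create_routes_dict_alt mst_dict root
instance (mst_dict : List (Int × Int)) (root : Int) (out : List (Int × List Int)) : Decidable (Spec_create_routes_dict mst_dict root out) := by unfold Spec_create_routes_dict; infer_instance

-- ===== CLAIM (what is proved, stated in full; the proofs are below) =====
def Claim_equal_create_routes_dict : Prop := ∀ (mst_dict : List (Int × Int)) (root : Int), Dom_create_routes_dict mst_dict root → Pre_create_routes_dict mst_dict root → Spec_create_routes_dict mst_dict root (create_routes_dict mst_dict root)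

-- ===== LEMMAS AND PROOFS =====

-- the route A computes, without the accumulator
def pvChain (d : PySem.Dict Int Int) (root : Int) : Nat → Int → List Int
  | 0, _ => []
  | f + 1, x =>
    if x == root then []
    else
      match d.get? x with
      | none => []
      | some p => p :: pvChain d root f p

-- invariant of B's memo: every entry is a correct route
def pvInv (d : PySem.Dict Int Int) (root : Int) (memo : PySem.Dict Int (List Int)) : Prop :=
  ∀ x v, memo.get? x = some v → ∃ f, pvReaches d root f x = true ∧ v = pvChain d root f x

theorem pvWalkA_eq (d : PySem.Dict Int Int) (root : Int) :
    ∀ (f : Nat) (x : Int) (acc : List Int),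
      pvWalkA d root f x acc = acc ++ pvChain d root f x := by
  intro f
  induction f with
  | zero => intro x acc; simp [pvWalkA, pvChain]
  | succ f ih =>
    intro x acc
    simp only [pvWalkA, pvChain]
    split
    · simp
    · cases h : d.get? x with
      | none => simp
      | some p => simp [ih]


theorem pvReaches_succ (d : PySem.Dict Int Int) (root : Int) :
    ∀ (f : Nat) (x : Int), pvReaches d root f x = true → pvReaches d root (f + 1) x = true := by
  intro f
  induction f with
  | zero => intro x h; simp [pvReaches] at h ⊢; exact Or.inl h
  | succ f ih =>
    intro x h
    cases hg : d.get? x with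
    | none => simp [pvReaches, hg] at h ⊢; exact h
    | some p =>
      simp only [pvReaches, hg, Bool.or_eq_true] at h ⊢
      rcases h with h | h
      · exact Or.inl h
      · right
        simpa only [pvReaches, Bool.or_eq_true] using ih p h

theorem pvReaches_mono (d : PySem.Dict Int Int) (root : Int)
    (f g : Nat) (x : Int) (hle : f ≤ g) (h : pvReaches d root f x = true) :
    pvReaches d root g x = true := by
  induction g, hle using Nat.le_induction with
  | base => exact h
  | succ g hle ih => exact pvReaches_succ d root g x ih

theorem pvChain_stable (d : PySem.Dict Int Int) (root : Int) :
    ∀ (f : Nat) (x : Int), pvReaches d root f x = true →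
      pvChain d root (f + 1) x = pvChain d root f x := by
  intro f
  induction f with
  | zero => intro x h; simp [pvReaches] at h; simp [pvChain, h]
  | succ f ih =>
    intro x h
    by_cases hr : x == root
    · rw [pvChain, pvChain]; simp [hr]
    · cases hg : d.get? x with
      | none => rw [pvChain, pvChain]; simp [hr, hg]
      | some p =>
        simp only [pvReaches, hg, Bool.or_eq_true] at h
        rcases h with h | h
        · exact absurd h (by simpa using hr)
        · rw [pvChain, pvChain]; simp only [hg, hr, Bool.false_eq_true, if_false]
          simp [ih p h]

theorem pvChain_of_le (d : PySem.Dict Int Int) (root : Int)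
    (f g : Nat) (x : Int) (hle : f ≤ g) (h : pvReaches d root f x = true) :
    pvChain d root g x = pvChain d root f x := by
  induction g, hle using Nat.le_induction with
  | base => rfl
  | succ g hle ih =>
    rw [pvChain_stable d root g x (pvReaches_mono d root f g x hle h)]
    exact ih

def pvRChain (d : PySem.Dict Int Int) : Int → List Int → Prop
  | _, [] => True
  | t, x :: rest => d.get? x = some t ∧ pvRChain d x rest

theorem pvRChain_snoc (d : PySem.Dict Int Int) :
    ∀ (l : List Int) (t z : Int), pvRChain d t l → d.get? z = some (l.getLastD t) →
      pvRChain d t (l ++ [z]) := by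
  intro l
  induction l with
  | nil => intro t z _ hz; exact ⟨by simpa using hz, trivial⟩
  | cons x rest ih =>
    intro t z h hz
    obtain ⟨h1, h2⟩ := h
    exact ⟨h1, ih x z h2 (by rwa [List.getLastD_cons] at hz)⟩

theorem pvClimb_spec (d : PySem.Dict Int Int) (root : Int) :
    ∀ (f : Nat) (fuel : Nat) (cur : Int) (acc : List Int) (memo : PySem.Dict Int (List Int)),
      f ≤ fuel → pvReaches d root f cur = true → memo.contains root = true →
      ∃ t new, pvClimb d memo fuel cur acc = new ++ acc ∧ pvRChain d t new ∧
        memo.contains t = true ∧ (∀ x ∈ new, memo.contains x = false) ∧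
        new.getLastD t = cur := by
  intro f
  induction f with
  | zero =>
    intro fuel cur acc memo _ hr hroot
    have hcur : cur = root := by simpa [pvReaches] using hr
    subst hcur
    refine ⟨cur, [], ?_, trivial, hroot, by simp, rfl⟩
    cases fuel with
    | zero => rfl
    | succ fuel => simp [pvClimb, hroot]
  | succ f ih =>
    intro fuel cur acc memo hle hr hroot
    cases fuel with
    | zero => omega
    | succ fuel =>
      by_cases hc : memo.contains cur = true
      · exact ⟨cur, [], by simp [pvClimb, hc], trivial, hc, by simp, rfl⟩
      · have hcr : cur ≠ root := fun h => hc (h ▸ hroot)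
        have hget : ∃ p, d.get? cur = some p ∧ pvReaches d root f p = true := by
          simp only [pvReaches, Bool.or_eq_true] at hr
          rcases hr with h | h
          · exact absurd (by simpa using h) hcr
          · cases hg : d.get? cur with
            | none => rw [hg] at h; exact absurd h (by simp)
            | some p => rw [hg] at h; exact ⟨p, rfl, h⟩
        obtain ⟨p, hg, hrp⟩ := hget
        obtain ⟨t, new', heq, hch, hct, hfresh, hlast⟩ :=
          ih fuel p (cur :: acc) memo (by omega) hrp hroot
        refine ⟨t, new' ++ [cur], ?_, ?_, hct, ?_, ?_⟩
        · simp only [pvClimb, hc, Bool.false_eq_true, hg]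
          simp [heq]
        · exact pvRChain_snoc d new' t cur hch (by rw [hlast]; exact hg)
        · intro x hx
          rcases List.mem_append.mp hx with hx | hx
          · exact hfresh x hx
          · simp only [List.mem_singleton] at hx
            subst hx; exact Bool.not_eq_true _ ▸ (by simpa using hc)
        · exact List.getLastD_concat

theorem pvFill_spec (d : PySem.Dict Int Int) (root : Int) :
    ∀ (new : List Int) (t : Int) (memo : PySem.Dict Int (List Int)),
      pvInv d root memo → memo.contains t = true → pvRChain d t new →
      (∀ x ∈ new, x ≠ root) →
      pvInv d root (new.foldl (pvResolve d) memo) ∧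
      (∀ y, memo.contains y = true → (new.foldl (pvResolve d) memo).contains y = true) ∧
      (∀ x ∈ new, (new.foldl (pvResolve d) memo).contains x = true) := by
  intro new
  induction new with
  | nil => intro t memo hinv _ _ _; exact ⟨hinv, fun y hy => hy, by simp⟩
  | cons x rest ih =>
    intro t memo hinv hct hch hnr
    obtain ⟨hgx, hch'⟩ := hch
    have hxr : x ≠ root := hnr x (by simp)
    -- the value stored for t
    have hv : ∃ v, memo.get? t = some v := by
      cases hv : memo.get? t with
      | none =>
        rw [PySem.Dict.contains_eq_isSome_get?, hv] at hct
        simp at hct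
      | some v => exact ⟨v, rfl⟩
    obtain ⟨v, hv⟩ := hv
    obtain ⟨f, hrf, hvc⟩ := hinv t v hv
    have hgd : memo.getD t [] = v := by rw [PySem.Dict.getD_eq_get?_getD, hv]; rfl
    have hstep : pvResolve d memo x = memo.insert x (t :: v) := by
      simp [pvResolve, hgx, hgd]
    have hinv' : pvInv d root (memo.insert x (t :: v)) := by
      intro y w hy
      by_cases hyx : y = x
      · subst hyx
        rw [PySem.Dict.get?_insert_self] at hy
        refine ⟨f + 1, ?_, ?_⟩
        · simp only [pvReaches, hgx, Bool.or_eq_true]; exact Or.inr hrf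
        · cases hy
          rw [pvChain]
          simp [hxr, hgx, hvc]
      · rw [PySem.Dict.get?_insert_of_ne _ _ hyx] at hy
        exact hinv y w hy
    have hcx : (memo.insert x (t :: v)).contains x = true := PySem.Dict.contains_insert_self _ _ _
    obtain ⟨hinv2, hmono2, hall2⟩ := ih x (memo.insert x (t :: v)) hinv' hcx hch'
      (fun z hz => hnr z (by simp [hz]))
    refine ⟨by simpa [List.foldl, hstep] using hinv2, ?_, ?_⟩
    · intro y hy
      have : (memo.insert x (t :: v)).contains y = true := by
        rw [PySem.Dict.contains_insert]; simp [hy]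
      simpa [List.foldl, hstep] using hmono2 y this
    · intro z hz
      rcases List.mem_cons.mp hz with hz | hz
      · subst hz; simpa [List.foldl, hstep] using hmono2 z hcx
      · simpa [List.foldl, hstep] using hall2 z hz

theorem pvChain_unique (d : PySem.Dict Int Int) (root : Int) (f g : Nat) (x : Int)
    (hf : pvReaches d root f x = true) (hg : pvReaches d root g x = true) :
    pvChain d root f x = pvChain d root g x := by
  rcases le_total f g with h | h
  · rw [pvChain_of_le d root f g x h hf]
  · rw [pvChain_of_le d root g f x h hg]

theorem pvGetLastD_mem : ∀ (l : List Int) (t : Int), l = [] ∨ l.getLastD t ∈ l := by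
  intro l
  induction l with
  | nil => intro t; left; rfl
  | cons a as ih =>
    intro t
    right
    rw [List.getLastD_cons]
    rcases ih a with h | h
    · subst h; simp [List.getLastD]
    · exact List.mem_cons_of_mem _ h

theorem pvNode_step (d : PySem.Dict Int Int) (root : Int) (L : Nat)
    (memo : PySem.Dict Int (List Int)) (node : Int)
    (hinv : pvInv d root memo) (hroot : memo.contains root = true)
    (hr : pvReaches d root L node = true) :
    pvInv d root ((pvClimb d memo (L + 1) node []).foldl (pvResolve d) memo) ∧
    (∀ y, memo.contains y = true →
      ((pvClimb d memo (L + 1) node []).foldl (pvResolve d) memo).contains y = true) ∧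
    ((pvClimb d memo (L + 1) node []).foldl (pvResolve d) memo).contains node = true := by
  obtain ⟨t, new, heq, hch, hct, hfresh, hlast⟩ :=
    pvClimb_spec d root L (L + 1) node [] memo (by omega) hr hroot
  rw [List.append_nil] at heq
  have hnr : ∀ x ∈ new, x ≠ root := by
    intro x hx hxr
    subst hxr
    rw [hfresh x hx] at hroot
    exact Bool.false_ne_true hroot
  obtain ⟨hinv2, hmono2, hall2⟩ := pvFill_spec d root new t memo hinv hct hch hnr
  rw [heq]
  refine ⟨hinv2, hmono2, ?_⟩
  rcases pvGetLastD_mem new t with hne | hmem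
  · subst hne
    have ht : t = node := by simpa [List.getLastD] using hlast
    rw [← ht]
    exact hmono2 t hct
  · rw [hlast] at hmem
    exact hall2 node hmem

theorem pvKeysFold_spec (d : PySem.Dict Int Int) (root : Int) (L : Nat) :
    ∀ (ks : List Int) (memo : PySem.Dict Int (List Int)),
      pvInv d root memo → memo.contains root = true →
      (∀ k ∈ ks, pvReaches d root L k = true) →
      pvInv d root (ks.foldl (fun memo node =>
          (pvClimb d memo (L + 1) node []).foldl (pvResolve d) memo) memo) ∧
      (∀ y, memo.contains y = true → (ks.foldl (fun memo node =>
          (pvClimb d memo (L + 1) node []).foldl (pvResolve d) memo) memo).contains y = true) ∧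
      (∀ k ∈ ks, (ks.foldl (fun memo node =>
          (pvClimb d memo (L + 1) node []).foldl (pvResolve d) memo) memo).contains k = true) := by
  intro ks
  induction ks with
  | nil => intro memo hinv hroot _; exact ⟨hinv, fun y hy => hy, by simp⟩
  | cons k ks ih =>
    intro memo hinv hroot hks
    obtain ⟨hinv1, hmono1, hk1⟩ := pvNode_step d root L memo k hinv hroot (hks k (by simp))
    obtain ⟨hinv2, hmono2, hall2⟩ := ih _ hinv1 (hmono1 root hroot)
      (fun k' hk' => hks k' (by simp [hk']))
    refine ⟨hinv2, ?_, ?_⟩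
    · intro y hy
      exact hmono2 y (hmono1 y hy)
    · intro k' hk'
      rcases List.mem_cons.mp hk' with h | h
      · subst h; exact hmono2 k' hk1
      · exact hall2 k' h

theorem pvFoldInsert_congr (ks : List Int) (fA fB : Int → List Int)
    (h : ∀ k ∈ ks, fA k = fB k) :
    ∀ (r : PySem.Dict Int (List Int)),
      ks.foldl (fun r k => r.insert k (fA k)) r = ks.foldl (fun r k => r.insert k (fB k)) r := by
  induction ks with
  | nil => intro r; rfl
  | cons k ks ih =>
    intro r
    rw [List.foldl_cons, List.foldl_cons, h k (by simp)]
    exact ih (fun k' hk' => h k' (by simp [hk'])) _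

theorem pvMemKeys (l : List (Int × Int)) (k : Int) (h : k ∈ (PySem.Dict.ofList l).keys) :
    k ∈ l.map Prod.fst := by
  rw [PySem.Dict.ofList, PySem.Dict.update, PySem.Dict.keys_foldl_insert_key l Prod.fst] at h
  simpa [PySem.Dict.keys_empty] using (PySem.Set.mem_update _ _ _).mp h

theorem pvInv_init (d : PySem.Dict Int Int) (root : Int) :
    pvInv d root (PySem.Dict.empty.insert root []) := by
  intro x v hx
  by_cases hxr : x = root
  · subst hxr
    rw [PySem.Dict.get?_insert_self] at hx
    cases hx
    exact ⟨0, by simp [pvReaches], rfl⟩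
  · rw [PySem.Dict.get?_insert_of_ne _ _ hxr, PySem.Dict.get?_empty] at hx
    cases hx

theorem main_thm (mst_dict : List (Int × Int)) (root : Int)
    (hpre : (mst_dict.all (fun kv =>
      pvReaches (PySem.Dict.ofList mst_dict) root mst_dict.length kv.1)) = true) :
    (let d := PySem.Dict.ofList mst_dict
     let routes : PySem.Dict Int (List Int) := PySem.Dict.empty.insert root []
     let routes := d.keys.foldl (fun routes node =>
       routes.insert node (pvWalkA d root (mst_dict.length + 1) node [])) routes
     routes.items) =
    (let d := PySem.Dict.ofList mst_dict
     let memo : PySem.Dict Int (List Int) := PySem.Dict.empty.insert root []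
     let memo := d.keys.foldl (fun memo node =>
       (pvClimb d memo (mst_dict.length + 1) node []).foldl (pvResolve d) memo) memo
     let routes : PySem.Dict Int (List Int) := PySem.Dict.empty.insert root []
     let routes := d.keys.foldl (fun routes node => routes.insert node (memo.getD node [])) routes
     routes.items) := by
  simp only []
  set d := PySem.Dict.ofList mst_dict with hd
  set L := mst_dict.length with hL
  have hroot : (PySem.Dict.empty.insert root ([] : List Int)).contains root = true :=
    PySem.Dict.contains_insert_self _ _ _
  have hreach : ∀ k ∈ d.keys, pvReaches d root L k = true := by
    intro k hk
    have := pvMemKeys mst_dict k hk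
    rw [List.all_eq_true] at hpre
    obtain ⟨kv, hkv, hfst⟩ := List.mem_map.mp this
    have := hpre kv hkv
    rw [hfst] at this
    exact this
  obtain ⟨hinv, hmono, hall⟩ := pvKeysFold_spec d root L d.keys
    (PySem.Dict.empty.insert root []) (pvInv_init d root) hroot hreach
  congr 1
  apply pvFoldInsert_congr
  intro k hk
  set memoF := d.keys.foldl (fun memo node =>
    (pvClimb d memo (L + 1) node []).foldl (pvResolve d) memo)
    (PySem.Dict.empty.insert root []) with hm
  have hck := hall k hk
  have : ∃ v, memoF.get? k = some v := by
    cases hv : memoF.get? k with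
    | none => rw [PySem.Dict.contains_eq_isSome_get?, hv] at hck; simp at hck
    | some v => exact ⟨v, rfl⟩
  obtain ⟨v, hv⟩ := this
  obtain ⟨f, hrf, hvc⟩ := hinv k v hv
  have hgd : memoF.getD k [] = v := by rw [PySem.Dict.getD_eq_get?_getD, hv]; rfl
  rw [pvWalkA_eq, List.nil_append, hgd, hvc]
  have hrL1 : pvReaches d root (L + 1) k = true :=
    pvReaches_succ d root L k (hreach k hk)
  exact pvChain_unique d root (L + 1) f k hrL1 hrf

-- ===== VERDICT (by name: the statement is the Claim_ definition above) =====
theorem create_routes_dict_spec : Claim_equal_create_routes_dict := by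
  intro mst_dict root _ hpre
  unfold Pre_create_routes_dict at hpre
  simp only [Spec_create_routes_dict, create_routes_dict, create_routes_dict_alt]
  exact main_thm mst_dict root hpre
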